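-- pv_equiv track=rewrite | github.com/ruohanliu/leetcode | python/2282 seePeople.py | seePeople
-- ===== SOURCE A (Python) =====
-- from typing import List
--
-- def seePeople(heights: List[List[int]]) -> List[List[int]]:
--     """
--         #monostack
--         related 1944
--     """
--     m = len(heights)
--     n = len(heights[0])
--     ans = [[0]*n for _ in range(m)]
--
--     for i in range(m):
--         stack = []
--         for j in range(n):
--             while stack and heights[i][stack[-1]] < heights[i][j]:
--                 ans[i][stack.pop()] += 1
--             if stack:
--                 ans[i][stack[-1]] += 1
--                 if heights[i][stack[-1]] == heights[i][j]:
--                     stack[-1] = j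
--                     continue
--             stack.append(j)
--
--     for j in range(n):
--         stack = []
--         for i in range(m):
--             while stack and heights[stack[-1]][j] < heights[i][j]:
--                 ans[stack.pop()][j] += 1
--             if stack:
--                 ans[stack[-1]][j] += 1
--                 if heights[stack[-1]][j] == heights[i][j]:
--                     stack[-1] = i
--                     continue
--             stack.append(i)
--     return ans
-- ===== SOURCE B (Python) =====
-- from typing import List
--
-- def seePeople(heights: List[List[int]]) -> List[List[int]]:
--     # Direct-scan re-implementation: for each person, scan forward keeping the
--     # running max of the heights strictly between; count when it is below both ends.
--     m = len(heights)
--     n = len(heights[0])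
--
--     def scan(src, rest):
--         cnt, mx = 0, None
--         for h in rest:
--             if mx is None or (mx < src and mx < h):
--                 cnt += 1
--             mx = h if mx is None else max(mx, h)
--         return cnt
--
--     rows = [[scan(heights[i][a], [heights[i][b] for b in range(a + 1, n)])
--              for a in range(n)] for i in range(m)]
--     cols = [[scan(heights[a][j], [heights[b][j] for b in range(a + 1, m)])
--              for a in range(m)] for j in range(n)]
--     return [[rows[i][a] + cols[a][i] for a in range(n)] for i in range(m)]
-- ===== Notes on version B (the rewrite author's own statement) =====
-- stated objective: simpler
-- what changed: Replaced the two monotonic-stack passes (with pop/replace tie handling) by direct forward scans: for each person and each direction, scan the following people keeping the running max of the heights strictly between, counting whenever that max is below both endpoints, then add row and column counts.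
import Mathlib
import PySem

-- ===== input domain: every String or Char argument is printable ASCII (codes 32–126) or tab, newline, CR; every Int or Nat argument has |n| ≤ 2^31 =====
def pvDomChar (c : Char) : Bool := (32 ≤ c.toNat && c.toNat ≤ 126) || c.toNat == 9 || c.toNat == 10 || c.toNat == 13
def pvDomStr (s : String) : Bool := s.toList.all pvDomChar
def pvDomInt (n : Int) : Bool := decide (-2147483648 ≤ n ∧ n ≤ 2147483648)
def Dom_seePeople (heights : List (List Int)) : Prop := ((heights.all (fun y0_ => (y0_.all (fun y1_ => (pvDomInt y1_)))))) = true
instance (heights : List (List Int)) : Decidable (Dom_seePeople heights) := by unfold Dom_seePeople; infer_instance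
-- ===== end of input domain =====

-- B drops the monotonic stacks: for each person it scans forward (right / down)
-- keeping the running max of the heights strictly between, and counts a person
-- whenever that max is below both endpoints.  Objective: simpler (no stack
-- bookkeeping); not faster.  A mutates nothing observable; equivalence is about
-- the return value.

-- ===== PORT A =====
-- ans[t] += 1
def incAt (ans : List Int) (t : Nat) : List Int := ans.modify t (· + 1)

-- the 'while stack and h[stack[-1]] < h[j]: ans[stack.pop()] += 1' loop (stack top first)
def popsA (f : Nat → Int) (j : Nat) : List Int → List Nat → List Int × List Nat
  | ans, [] => (ans, [])
  | ans, t :: rest =>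
      if f t < f j then popsA f j (incAt ans t) rest else (ans, t :: rest)

-- one iteration of the inner 'for' loop of either pass of A (index j, heights read through f)
def stepA (f : Nat → Int) (st : List Int × List Nat) (j : Nat) : List Int × List Nat :=
  match popsA f j st.1 st.2 with
  | (ans, []) => (ans, [j])
  | (ans, t :: rest) =>
      if f t == f j then (incAt ans t, j :: rest) else (incAt ans t, j :: t :: rest)

-- the inner loop of a pass of A over indices 0..n-1, updating the given line of ans
def rowLoopA (f : Nat → Int) (n : Nat) (init : List Int) : List Int :=
  ((List.range n).foldl (stepA f) (init, [])).1

def getColA (ans : List (List Int)) (j m : Nat) : List Int :=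
  (List.range m).map (fun i => (ans.getD i []).getD j 0)

def setColA (ans : List (List Int)) (j : Nat) (col : List Int) : List (List Int) :=
  List.mapIdx (fun i row => row.set j (col.getD i 0)) ans

-- A's in-place 2D updates touch only row i (pass 1) / column j (pass 2) per outer
-- iteration, so each pass is ported as that row/column's stack loop written back.
def seePeople (heights : List (List Int)) : List (List Int) :=
  let m := heights.length
  let n := (heights.headD []).length
  let ans0 := (List.range m).map (fun _ => List.replicate n (0 : Int))
  let ans1 := (List.range m).foldl (fun ans i =>
      ans.set i (rowLoopA (fun k => (heights.getD i []).getD k 0) n (ans.getD i []))) ans0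
  (List.range n).foldl (fun ans j =>
      setColA ans j (rowLoopA (fun k => (heights.getD k []).getD j 0) heights.length
        (getColA ans j heights.length))) ans1

-- ===== PORT B =====
-- the 'for h in rest' loop of B's scan, state (cnt, mx)
def scanGo (src : Int) (cnt : Int) (mx : Option Int) : List Int → Int
  | [] => cnt
  | h :: rest =>
      let cnt' := match mx with
        | none => cnt + 1
        | some mv => if mv < src ∧ mv < h then cnt + 1 else cnt
      scanGo src cnt' (some (match mx with | none => h | some mv => max mv h)) rest

def scanB (src : Int) (rest : List Int) : Int := scanGo src 0 none rest

def seePeople_alt (heights : List (List Int)) : List (List Int) :=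
  let m := heights.length
  let n := (heights.headD []).length
  let rows := (List.range m).map (fun i =>
    (List.range n).map (fun a =>
      scanB ((heights.getD i []).getD a 0)
        ((List.range' (a + 1) (n - (a + 1))).map (fun b => (heights.getD i []).getD b 0))))
  let cols := (List.range n).map (fun j =>
    (List.range m).map (fun a =>
      scanB ((heights.getD a []).getD j 0)
        ((List.range' (a + 1) (m - (a + 1))).map (fun b => (heights.getD b []).getD j 0))))
  (List.range m).map (fun i =>
    (List.range n).map (fun a => (rows.getD i []).getD a 0 + (cols.getD a []).getD i 0))

-- ===== PRECONDITION & SPEC =====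
-- Pre_ excludes exactly the inputs where the Python A raises IndexError:
-- empty heights (heights[0]) and rows shorter than the first row.
def Pre_seePeople (heights : List (List Int)) : Prop :=
  heights ≠ [] ∧ ∀ r ∈ heights, (heights.headD []).length ≤ r.length

instance (heights : List (List Int)) : Decidable (Pre_seePeople heights) := by
  unfold Pre_seePeople; infer_instance

def pvWitness_seePeople : List (List Int) := [[4, 2, 1, 3], [1, 1, 5, 2]]

def Spec_seePeople (heights : List (List Int)) (out : List (List Int)) : Prop :=
  out = seePeople_alt heights
instance (heights : List (List Int)) (out : List (List Int)) : Decidable (Spec_seePeople heights out) := by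
  unfold Spec_seePeople; infer_instance

-- ===== CLAIM (what is proved, stated in full; the proofs are below) =====
def Claim_equal_seePeople : Prop := ∀ (heights : List (List Int)),
  Dom_seePeople heights → Pre_seePeople heights → Spec_seePeople heights (seePeople heights)

-- ===== LEMMAS AND PROOFS =====

-- running max of f over the d indices lo, lo+1, …, lo+d-1 (none when d = 0)
def omaxI (f : Nat → Int) (lo : Nat) : Nat → Option Int
  | 0 => none
  | d + 1 => some (match omaxI f lo d with | none => f (lo + d) | some m => max m (f (lo + d)))

def obelow (o : Option Int) (x : Int) : Bool :=
  match o with | none => true | some m => decide (m < x)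

-- visibility condition: everyone strictly between a and t is below both f a and f t
def condC (f : Nat → Int) (a t : Nat) : Bool :=
  obelow (omaxI f (a + 1) (t - (a + 1))) (f a) && obelow (omaxI f (a + 1) (t - (a + 1))) (f t)

-- number of indices visible from a within [0, j)
def C (f : Nat → Int) (a j : Nat) : Int :=
  (((List.range' (a + 1) (j - (a + 1))).filter (condC f a)).length : Int)

theorem omaxI_eq_none (f : Nat → Int) (lo d : Nat) : omaxI f lo d = none ↔ d = 0 := by
  cases d <;> simp [omaxI]

theorem obelow_omaxI (f : Nat → Int) (x : Int) :
    ∀ d lo, obelow (omaxI f lo d) x = true ↔ ∀ k, lo ≤ k → k < lo + d → f k < x := by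
  intro d
  induction d with
  | zero => intro lo; simp [omaxI, obelow]; omega
  | succ d ih =>
    intro lo
    cases hmx : omaxI f lo d with
    | none =>
      have hd : d = 0 := (omaxI_eq_none f lo d).mp hmx
      subst hd
      simp [omaxI, obelow]
      constructor
      · intro h k h1 h2
        have : k = lo := by omega
        simpa [this] using h
      · intro h; exact h lo le_rfl (by omega)
    | some m =>
      have ihlo := ih lo
      rw [hmx] at ihlo
      simp only [omaxI, hmx, obelow, decide_eq_true_eq] at *
      constructor
      · intro h k h1 h2
        rcases Nat.lt_or_ge k (lo + d) with hk | hk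
        · exact ihlo.mp ((le_max_left m _).trans_lt h) k h1 hk
        · have : k = lo + d := by omega
          subst this
          exact lt_of_le_of_lt (le_max_right _ _) h
      · intro h
        have h1 : m < x := ihlo.mpr (fun k hk1 hk2 => h k hk1 (by omega))
        have h2 : f (lo + d) < x := h _ (by omega) (by omega)
        exact max_lt h1 h2

theorem scanGo_spec (f : Nat → Int) (a : Nat) :
    ∀ d e (cnt : Int),
      scanGo (f a) cnt (omaxI f (a + 1) e) ((List.range' (a + 1 + e) d).map f)
        = cnt + (((List.range' (a + 1 + e) d).filter (condC f a)).length : Int) := by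
  intro d
  induction d with
  | zero => intro e cnt; simp [scanGo]
  | succ d ih =>
    intro e cnt
    rw [List.range'_succ]
    have hsub : a + 1 + e - (a + 1) = e := by omega
    have hcond : condC f a (a + 1 + e)
        = (obelow (omaxI f (a + 1) e) (f a) && obelow (omaxI f (a + 1) e) (f (a + 1 + e))) := by
      simp [condC, hsub]
    have hnext : (some (match omaxI f (a + 1) e with
        | none => f (a + 1 + e) | some mv => max mv (f (a + 1 + e))))
        = omaxI f (a + 1) (e + 1) := by
      simp [omaxI]
    cases hmx : omaxI f (a + 1) e with
    | none =>
      have hd : e = 0 := (omaxI_eq_none f (a + 1) e).mp hmx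
      subst hd
      simp only [List.map_cons, scanGo]
      have hx := ih (0 + 1) (cnt + 1)
      simp only [omaxI] at hx
      rw [show a + 1 + 0 + 1 = a + 1 + (0 + 1) by omega, hx]
      rw [List.filter_cons]
      have hc : condC f a (a + 1 + 0) = true := by
        simp [condC, omaxI, obelow]
      rw [hc]
      simp
      ring
    | some m =>
      rw [hmx] at hnext
      simp only [List.map_cons, scanGo]
      rw [hnext, show a + 1 + e + 1 = a + 1 + (e + 1) by omega]
      rw [List.filter_cons, hcond, hmx]
      by_cases hlt : m < f a ∧ m < f (a + 1 + e)
      · rw [if_pos hlt, ih (e + 1) (cnt + 1)]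
        have hb : (obelow (some m) (f a) && obelow (some m) (f (a + 1 + e))) = true := by
          simp [obelow, hlt.1, hlt.2]
        rw [hb]
        simp
        ring
      · rw [if_neg hlt, ih (e + 1) cnt]
        have hb : (obelow (some m) (f a) && obelow (some m) (f (a + 1 + e))) = false := by
          simp [obelow]; omega
        rw [hb]
        simp

theorem scanB_eq_C (f : Nat → Int) (a n : Nat) :
    scanB (f a) ((List.range' (a + 1) (n - (a + 1))).map f) = C f a n := by
  have := scanGo_spec f a (n - (a + 1)) 0 0
  simpa [scanB, omaxI, C] using this

-- ------- A side -------

theorem length_incAt (ans : List Int) (t : Nat) : (incAt ans t).length = ans.length := by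
  simp [incAt]

theorem getD_incAt (ans : List Int) (t a : Nat) :
    (incAt ans t).getD a 0 = if a = t ∧ t < ans.length then ans.getD a 0 + 1 else ans.getD a 0 := by
  unfold incAt
  rw [List.getD_eq_getElem?_getD, List.getD_eq_getElem?_getD, List.getElem?_modify]
  by_cases h : a < ans.length
  · rw [List.getElem?_eq_getElem h]
    by_cases ht : a = t
    · subst ht; simp [h]
    · have hne : ¬ (t = a) := fun e => ht e.symm
      simp [hne, ht]
  · have hnone : ans[a]? = none := List.getElem?_eq_none (by omega)
    rw [hnone]
    have : ¬ (a = t ∧ t < ans.length) := by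
      rintro ⟨rfl, hlt⟩; omega
    simp [this]

theorem foldl_incAt_length (P : List Nat) : ∀ ans, (P.foldl incAt ans).length = ans.length := by
  induction P with
  | nil => intro ans; rfl
  | cons t P ih => intro ans; rw [List.foldl_cons, ih, length_incAt]

theorem foldl_incAt_getD (P : List Nat) : ∀ (ans : List Int) (a : Nat),
    (P.foldl incAt ans).getD a 0
      = ans.getD a 0 + (if a < ans.length then (P.count a : Int) else 0) := by
  induction P with
  | nil => intro ans a; simp
  | cons t P ih =>
    intro ans a
    rw [List.foldl_cons, ih, getD_incAt, length_incAt, List.count_cons]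
    by_cases ht : a = t
    · subst ht
      by_cases h : a < ans.length
      · simp [h]; ring
      · simp [h]
    · have hne : (t == a) = false := by
        simp
        exact fun e => ht e.symm
      by_cases h : a < ans.length <;> simp [h, ht, hne]

theorem popsA_spec (f : Nat → Int) (j : Nat) :
    ∀ (stack : List Nat) (ans : List Int),
      popsA f j ans stack
        = ((stack.takeWhile (fun t => decide (f t < f j))).foldl incAt ans,
           stack.dropWhile (fun t => decide (f t < f j))) := by
  intro stack
  induction stack with
  | nil => intro ans; simp [popsA]
  | cons t rest ih =>
    intro ans
    by_cases h : f t < f j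
    · simp [popsA, h, ih]
    · simp [popsA, h]

def InvA (f : Nat → Int) (init : List Int) (j : Nat) (st : List Int × List Nat) : Prop :=
  st.1.length = init.length ∧
  st.2.Pairwise (fun x y => y < x) ∧
  (∀ a, a ∈ st.2 ↔ (a < j ∧ ∀ k, a < k → k < j → f k < f a)) ∧
  (∀ a, st.1.getD a 0 = init.getD a 0 + C f a j)

theorem C_zero (f : Nat → Int) (a : Nat) : C f a 0 = 0 := by
  simp [C]

theorem C_succ (f : Nat → Int) (a j : Nat) :
    C f a (j + 1) = C f a j + (if a < j ∧ condC f a j = true then 1 else 0) := by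
  by_cases h : a < j
  · have h1 : j + 1 - (a + 1) = (j - (a + 1)) + 1 := by omega
    have h2 : a + 1 + 1 * (j - (a + 1)) = j := by omega
    unfold C
    rw [h1, List.range'_concat, h2, List.filter_append]
    by_cases hc : condC f a j = true
    · simp [hc, h]
    · simp [hc, h]
  · have h1 : j + 1 - (a + 1) = 0 := by omega
    have h2 : j - (a + 1) = 0 := by omega
    simp [C, h1, h2, h]

theorem condC_iff (f : Nat → Int) (a j : Nat) (h : a < j) :
    condC f a j = true ↔ ∀ k, a < k → k < j → f k < f a ∧ f k < f j := by
  have hd : a + 1 + (j - (a + 1)) = j := by omega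
  simp only [condC, Bool.and_eq_true, obelow_omaxI, hd]
  constructor
  · rintro ⟨h1, h2⟩ k hk1 hk2
    exact ⟨h1 k (by omega) hk2, h2 k (by omega) hk2⟩
  · intro hh
    exact ⟨fun k hk1 hk2 => (hh k (by omega) hk2).1, fun k hk1 hk2 => (hh k (by omega) hk2).2⟩

theorem maxcover (f : Nat → Int) (j : Nat) (stack : List Nat)
    (hchar : ∀ a, a ∈ stack ↔ (a < j ∧ ∀ k, a < k → k < j → f k < f a)) :
    ∀ k, k < j → ∃ t ∈ stack, k ≤ t ∧ f k ≤ f t := by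
  have key : ∀ d k, k < j → j - k ≤ d → ∃ t ∈ stack, k ≤ t ∧ f k ≤ f t := by
    intro d
    induction d with
    | zero => intro k hk hd; omega
    | succ d ih =>
      intro k hk hd
      by_cases hb : ∀ x, k < x → x < j → f x < f k
      · exact ⟨k, (hchar k).mpr ⟨hk, hb⟩, le_rfl, le_rfl⟩
      · push Not at hb
        obtain ⟨k', h1, h2, h3⟩ := hb
        obtain ⟨t, ht, h4, h5⟩ := ih k' h2 (by omega)
        exact ⟨t, ht, by omega, le_trans h3 h5⟩
  exact fun k hk => key (j - k) k hk le_rfl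

theorem invA_init (f : Nat → Int) (init : List Int) : InvA f init 0 (init, []) := by
  refine ⟨rfl, List.Pairwise.nil, ?_, ?_⟩
  · intro a; simp
  · intro a; simp [C_zero]

theorem invA_step (f : Nat → Int) (init : List Int) (j : Nat) (st : List Int × List Nat)
    (hj : j < init.length) (h : InvA f init j st) : InvA f init (j + 1) (stepA f st j) := by
  obtain ⟨ans, stack⟩ := st
  obtain ⟨hlen, hpw, hchar, hcnt⟩ := h
  simp only at hlen hpw hchar hcnt
  have hmemlt : ∀ a ∈ stack, a < j := fun a ha => ((hchar a).mp ha).1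
  have hBdd : ∀ a ∈ stack, ∀ k, a < k → k < j → f k < f a := fun a ha => ((hchar a).mp ha).2
  have hnd : stack.Nodup := hpw.imp (fun hxy => ne_of_gt hxy)
  set p : Nat → Bool := fun t => decide (f t < f j) with hp
  set P := stack.takeWhile p with hP
  set R := stack.dropWhile p with hR
  have hsplit : P ++ R = stack := List.takeWhile_append_dropWhile
  have hPmem : ∀ a ∈ P, a ∈ stack := (List.takeWhile_sublist p).subset
  have hRmem : ∀ a ∈ R, a ∈ stack := (List.dropWhile_sublist p).subset
  have hPlt : ∀ a ∈ P, f a < f j := by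
    intro a ha
    have := List.mem_takeWhile_imp ha
    simpa [hp] using this
  have hndPR : (P ++ R).Nodup := by rw [hsplit]; exact hnd
  have hdisj : P.Disjoint R := List.disjoint_of_nodup_append hndPR
  have hpwPR : (P ++ R).Pairwise (fun x y => y < x) := by rw [hsplit]; exact hpw
  have hpwR : R.Pairwise (fun x y => y < x) := (List.pairwise_append.mp hpwPR).2.1
  -- the result of the pops
  have hpops : popsA f j ans stack = (P.foldl incAt ans, R) := popsA_spec f j stack ans
  have hlenP : (P.foldl incAt ans).length = ans.length := foldl_incAt_length P ans
  -- common count argument: value of the popped-and-maybe-bumped ans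
  have hcount : ∀ (extra : List Nat),
      (∀ t ∈ extra, t ∈ stack ∧ t ∉ P ∧ (∀ k, t < k → k < j → f k < f j)) → extra.Nodup →
      (∀ a, a ∈ P ∨ a ∈ extra ↔ (a < j ∧ condC f a j = true)) →
      ∀ a, (extra.foldl incAt (P.foldl incAt ans)).getD a 0 = init.getD a 0 + C f a (j + 1) := by
    intro extra hextra hnde hiff a
    rw [foldl_incAt_getD, foldl_incAt_getD, hlenP, hcnt a, C_succ]
    by_cases hin : a < j ∧ condC f a j = true
    · rcases (hiff a).mpr hin with hA | hA
      · have h1 : (P.count a : Int) = 1 := by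
          exact_mod_cast (List.count_eq_one_of_mem (hndPR.sublist (List.sublist_append_left _ _)) hA)
        have h2 : (extra.count a : Int) = 0 := by
          have : a ∉ extra := fun hmem => (hextra a hmem).2.1 hA
          exact_mod_cast (List.count_eq_zero.mpr this)
        have ha1 : a < ans.length := by rw [hlen]; omega
        simp [ha1, h1, h2, hin]
        ring
      · have h1 : (P.count a : Int) = 0 := by
          exact_mod_cast (List.count_eq_zero.mpr (fun hmem => (hextra a hA).2.1 hmem))
        have h2 : (extra.count a : Int) = 1 := by
          exact_mod_cast (List.count_eq_one_of_mem hnde hA)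
        have ha1 : a < ans.length := by rw [hlen]; omega
        simp [ha1, h1, h2, hin]
        ring
    · have hnm : a ∉ P ∧ a ∉ extra := by
        constructor <;> intro hmem
        · exact hin ((hiff a).mp (Or.inl hmem))
        · exact hin ((hiff a).mp (Or.inr hmem))
      have h1 : (P.count a : Int) = 0 := by
        exact_mod_cast (List.count_eq_zero.mpr hnm.1)
      have h2 : (extra.count a : Int) = 0 := by
        exact_mod_cast (List.count_eq_zero.mpr hnm.2)
      simp [h1, h2, hin]
  -- the membership condition for elements of P / non-elements
  have hPcond : ∀ a ∈ P, a < j ∧ condC f a j = true := by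
    intro a ha
    have haS := hPmem a ha
    have haj := hmemlt a haS
    refine ⟨haj, (condC_iff f a j haj).mpr ?_⟩
    intro k hk1 hk2
    have h1 := hBdd a haS k hk1 hk2
    exact ⟨h1, lt_trans h1 (hPlt a ha)⟩
  have hnotcond : ∀ a, a ∉ stack → a < j → ¬ condC f a j = true := by
    intro a haS haj hc
    apply haS
    refine (hchar a).mpr ⟨haj, ?_⟩
    intro k hk1 hk2
    exact ((condC_iff f a j haj).mp hc k hk1 hk2).1
  -- case split on the stack remaining after the pops
  unfold stepA
  rw [hpops]
  match hRe : R with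
  | [] =>
    have hstackP : stack = P := by rw [← hsplit]; simp
    refine ⟨by simpa using hlenP.trans hlen, by simp, ?_, ?_⟩
    · intro a
      simp only [List.mem_singleton]
      constructor
      · rintro rfl
        exact ⟨by omega, fun k hk1 hk2 => by omega⟩
      · rintro ⟨ha1, ha2⟩
        by_contra hne
        have haj : a < j := by omega
        have haS : a ∈ stack := by
          refine (hchar a).mpr ⟨haj, fun k hk1 hk2 => ha2 k hk1 (by omega)⟩
        have h1 : f a < f j := hPlt a (hstackP ▸ haS)
        have h2 : f j < f a := ha2 j haj (by omega)
        omega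
    · intro a
      have := hcount [] (by simp) (by simp) ?_ a
      · simpa using this
      · intro b
        simp only [List.mem_nil_iff, or_false]
        constructor
        · exact fun hb => hPcond b hb
        · rintro ⟨hb1, hb2⟩
          by_contra hbP
          exact hnotcond b (fun hS => hbP (hstackP ▸ hS)) hb1 hb2
  | t₀ :: rest =>
    have hRne : stack.dropWhile p ≠ [] := by rw [← hR]; simp
    have hpt₀ : p ((stack.dropWhile p).head hRne) = false := List.head_dropWhile_not p hRne
    have hhead : (stack.dropWhile p).head hRne = t₀ := by
      have : stack.dropWhile p = t₀ :: rest := by rw [← hR]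
      simp [this]
    rw [hhead] at hpt₀
    have hft₀ : ¬ f t₀ < f j := by simpa [hp] using hpt₀
    have ht₀S : t₀ ∈ stack := hRmem t₀ (by simp)
    have ht₀j : t₀ < j := hmemlt t₀ ht₀S
    have ht₀P : t₀ ∉ P := fun hmem => hdisj hmem (by simp)
    have hrestlt : ∀ a ∈ rest, a < t₀ := by
      exact fun a ha => (List.pairwise_cons.mp hpwR).1 a ha
    have hkey : ∀ k, t₀ < k → k < j → f k < f t₀ ∧ f k < f j := by
      intro k hk1 hk2
      refine ⟨hBdd t₀ ht₀S k hk1 hk2, ?_⟩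
      obtain ⟨t, htS, hkt, hfkt⟩ := maxcover f j stack hchar k hk2
      have hPT : t ∈ P ++ (t₀ :: rest) := by rw [hsplit]; exact htS
      rcases List.mem_append.mp hPT with htP | htR
      · exact lt_of_le_of_lt hfkt (hPlt t htP)
      · rcases List.mem_cons.mp htR with rfl | htr
        · omega
        · have := hrestlt t htr
          omega
    have ht₀cond : t₀ < j ∧ condC f t₀ j = true := by
      refine ⟨ht₀j, (condC_iff f t₀ j ht₀j).mpr (fun k hk1 hk2 => hkey k hk1 hk2)⟩
    have hiff : ∀ a, a ∈ P ∨ a ∈ [t₀] ↔ (a < j ∧ condC f a j = true) := by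
      intro a
      constructor
      · rintro (hA | hA)
        · exact hPcond a hA
        · rw [List.mem_singleton] at hA
          subst hA
          exact ht₀cond
      · rintro ⟨ha1, ha2⟩
        by_cases haP : a ∈ P
        · exact Or.inl haP
        by_cases hat₀ : a = t₀
        · exact Or.inr (by simp [hat₀])
        exfalso
        by_cases haS : a ∈ stack
        · -- a is in rest: blocked by t₀
          have haR : a ∈ t₀ :: rest := by
            have hPT : a ∈ P ++ (t₀ :: rest) := by rw [hsplit]; exact haS
            rcases List.mem_append.mp hPT with h1 | h1
            · exact absurd h1 haP
            · exact h1
          rcases List.mem_cons.mp haR with rfl | har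
          · exact hat₀ rfl
          · have hat : a < t₀ := hrestlt a har
            have := ((condC_iff f a j ha1).mp ha2 t₀ hat ht₀j).2
            omega
        · exact hnotcond a haS ha1 ha2
    have hcnt2 : ∀ a, (incAt (P.foldl incAt ans) t₀).getD a 0 = init.getD a 0 + C f a (j + 1) := by
      intro a
      have := hcount [t₀] ?_ (by simp) hiff a
      · simpa using this
      · intro t ht
        rw [List.mem_singleton] at ht
        subst ht
        exact ⟨ht₀S, ht₀P, fun k hk1 hk2 => (hkey k hk1 hk2).2⟩
    have hlen2 : (incAt (P.foldl incAt ans) t₀).length = init.length := by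
      rw [length_incAt, hlenP, hlen]
    -- characterization of the new stack, shared parts
    have hrestchar : ∀ a ∈ rest, (a < j + 1 ∧ ∀ k, a < k → k < j + 1 → f k < f a) := by
      intro a har
      have haS := hRmem a (by simp [har])
      have haj := hmemlt a haS
      have hat : a < t₀ := hrestlt a har
      refine ⟨by omega, fun k hk1 hk2 => ?_⟩
      by_cases hkj : k < j
      · exact hBdd a haS k hk1 hkj
      · have : k = j := by omega
        subst this
        have h1 : f t₀ < f a := hBdd a haS t₀ hat ht₀j
        omega
    have hnegchar : ∀ a, a ≠ j → a ∉ rest → a ≠ t₀ →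
        ¬ (a < j + 1 ∧ ∀ k, a < k → k < j + 1 → f k < f a) := by
      rintro a haj har hat₀ ⟨ha1, ha2⟩
      have haj' : a < j := by omega
      by_cases haS : a ∈ stack
      · have hPT : a ∈ P ++ (t₀ :: rest) := by rw [hsplit]; exact haS
        rcases List.mem_append.mp hPT with h1 | h1
        · have h2 : f a < f j := hPlt a h1
          have h3 : f j < f a := ha2 j haj' (by omega)
          omega
        · rcases List.mem_cons.mp h1 with rfl | h1
          · exact hat₀ rfl
          · exact har h1
      · have : a ∈ stack := by
          refine (hchar a).mpr ⟨haj', fun k hk1 hk2 => ha2 k hk1 (by omega)⟩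
        exact haS this
    show InvA f init (j + 1)
      (if (f t₀ == f j) = true then (incAt (List.foldl incAt ans P) t₀, j :: rest)
       else (incAt (List.foldl incAt ans P) t₀, j :: t₀ :: rest))
    by_cases heq : f t₀ = f j
    · rw [if_pos (by simpa using heq)]
      refine ⟨by simpa using hlen2, ?_, ?_, hcnt2⟩
      · simp only
        rw [List.pairwise_cons]
        refine ⟨fun a ha => ?_, (List.pairwise_cons.mp hpwR).2⟩
        have := hrestlt a ha
        omega
      · intro a
        simp only [List.mem_cons]
        constructor
        · rintro (rfl | har)
          · exact ⟨by omega, fun k hk1 hk2 => by omega⟩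
          · exact hrestchar a har
        · rintro hcond
          by_cases h1 : a = j
          · exact Or.inl h1
          by_cases h2 : a ∈ rest
          · exact Or.inr h2
          exfalso
          by_cases h3 : a = t₀
          · subst h3
            have := hcond.2 j ht₀j (by omega)
            omega
          · exact hnegchar a h1 h2 h3 hcond
    · rw [if_neg (by simpa using heq)]
      refine ⟨by simpa using hlen2, ?_, ?_, hcnt2⟩
      · simp only
        rw [List.pairwise_cons]
        constructor
        · intro a ha
          rcases List.mem_cons.mp ha with rfl | ha
          · omega
          · have := hrestlt a ha; omega
        · rw [List.pairwise_cons]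
          exact ⟨fun a ha => hrestlt a ha, (List.pairwise_cons.mp hpwR).2⟩
      · intro a
        simp only [List.mem_cons]
        constructor
        · rintro (rfl | rfl | har)
          · exact ⟨by omega, fun k hk1 hk2 => by omega⟩
          · refine ⟨by omega, fun k hk1 hk2 => ?_⟩
            by_cases hkj : k < j
            · exact hBdd _ ht₀S k hk1 hkj
            · have : k = j := by omega
              subst this
              omega
          · exact hrestchar a har
        · rintro hcond
          by_cases h1 : a = j
          · exact Or.inl h1
          by_cases h3 : a = t₀
          · exact Or.inr (Or.inl h3)
          by_cases h2 : a ∈ rest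
          · exact Or.inr (Or.inr h2)
          exact absurd hcond (hnegchar a h1 h2 h3)

theorem rowLoopA_inv (f : Nat → Int) (init : List Int) :
    ∀ j, j ≤ init.length → InvA f init j ((List.range j).foldl (stepA f) (init, [])) := by
  intro j
  induction j with
  | zero => intro _; simpa using invA_init f init
  | succ j ih =>
    intro hj
    rw [List.range_succ, List.foldl_append, List.foldl_cons, List.foldl_nil]
    exact invA_step f init j _ (by omega) (ih (by omega))

theorem rowLoopA_length (f : Nat → Int) (init : List Int) :
    (rowLoopA f init.length init).length = init.length := by
  exact (rowLoopA_inv f init init.length le_rfl).1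

theorem rowLoopA_getD (f : Nat → Int) (init : List Int) (a : Nat) :
    (rowLoopA f init.length init).getD a 0 = init.getD a 0 + C f a init.length := by
  exact (rowLoopA_inv f init init.length le_rfl).2.2.2 a

theorem getD_set {α : Type} (l : List α) (i k : Nat) (x d : α) :
    (l.set i x).getD k d = if i = k ∧ i < l.length then x else l.getD k d := by
  rw [List.getD_eq_getElem?_getD, List.getD_eq_getElem?_getD, List.getElem?_set]
  by_cases h1 : i = k
  · subst h1
    by_cases h2 : i < l.length
    · simp [h2]
    · rw [List.getElem?_eq_none (by omega)]
      simp [h2]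
  · simp [h1]

theorem getD_map_range {α : Type} (f : Nat → α) (m i : Nat) (d : α) :
    ((List.range m).map f).getD i d = if i < m then f i else d := by
  rw [List.getD_eq_getElem?_getD]
  by_cases h : i < m
  · simp [h]
  · rw [List.getElem?_eq_none (by simpa using h)]
    simp [h]

theorem getD_replicate_zero (n a : Nat) : (List.replicate n (0 : Int)).getD a 0 = 0 := by
  rw [List.getD_eq_getElem?_getD]
  by_cases h : a < n
  · simp [h]
  · rw [List.getElem?_eq_none (by simpa using h)]
    rfl

-- ------- plumbing -------

theorem pass1_spec (g : Nat → List Int → List Int) :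
    ∀ (m : Nat) (init : List (List Int)), m ≤ init.length →
      (((List.range m).foldl (fun ans i => ans.set i (g i (ans.getD i []))) init).length
          = init.length) ∧
      (∀ k, ((List.range m).foldl (fun ans i => ans.set i (g i (ans.getD i []))) init).getD k []
          = if k < m then g k (init.getD k []) else init.getD k []) := by
  intro m
  induction m with
  | zero => intro init h; exact ⟨rfl, fun k => by simp⟩
  | succ m ih =>
    intro init h
    obtain ⟨ihl, ihg⟩ := ih init (by omega)
    rw [List.range_succ, List.foldl_append, List.foldl_cons, List.foldl_nil]
    refine ⟨by rw [List.length_set, ihl], ?_⟩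
    intro k
    rw [getD_set]
    by_cases hk : m = k
    · subst hk
      rw [if_pos ⟨rfl, by rw [ihl]; omega⟩, if_pos (by omega)]
      have hmm := ihg m
      rw [if_neg (by omega)] at hmm
      rw [hmm]
    · rw [if_neg (by intro hc; exact hk hc.1), ihg k]
      rcases Nat.lt_trichotomy k m with h1 | h1 | h1
      · rw [if_pos h1, if_pos (by omega)]
      · exact absurd h1.symm hk
      · rw [if_neg (by omega), if_neg (by omega)]

theorem rowLoopA_len' (f : Nat → Int) (nn : Nat) (init : List Int) (h : init.length = nn) :
    (rowLoopA f nn init).length = nn := by subst h; exact rowLoopA_length f init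

theorem rowLoopA_getD' (f : Nat → Int) (nn : Nat) (init : List Int) (h : init.length = nn) (a : Nat) :
    (rowLoopA f nn init).getD a 0 = init.getD a 0 + C f a nn := by
  subst h; exact rowLoopA_getD f init a

theorem pass2_spec (g : Nat → List Int → List Int) (m nrow : Nat) :
    ∀ (ncols : Nat) (init : List (List Int)), init.length = m →
      (∀ r ∈ init, r.length = nrow) → ncols ≤ nrow →
      (((List.range ncols).foldl (fun ans j => setColA ans j (g j (getColA ans j m))) init).length = m) ∧
      (∀ r ∈ (List.range ncols).foldl (fun ans j => setColA ans j (g j (getColA ans j m))) init,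
          r.length = nrow) ∧
      (∀ i a, i < m →
        (((List.range ncols).foldl (fun ans j => setColA ans j (g j (getColA ans j m))) init).getD i []).getD a 0
          = if a < ncols then (g a (getColA init a m)).getD i 0 else (init.getD i []).getD a 0) := by
  intro ncols
  induction ncols with
  | zero =>
    intro init h1 h2 _
    exact ⟨by simpa using h1, by simpa using h2, fun i a hi => by simp⟩
  | succ nc ih =>
    intro init h1 h2 hle
    obtain ⟨ihl, ihr, ihg⟩ := ih init h1 h2 (by omega)
    rw [List.range_succ, List.foldl_append, List.foldl_cons, List.foldl_nil]
    set F := (List.range nc).foldl (fun ans j => setColA ans j (g j (getColA ans j m))) init with hF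
    have hcol : getColA F nc m = getColA init nc m := by
      unfold getColA
      apply List.map_congr_left
      intro i hi
      rw [List.mem_range] at hi
      have hx := ihg i nc hi
      rw [if_neg (by omega)] at hx
      exact hx
    have hFrow : ∀ k, k < m → (F.getD k []).length = nrow := by
      intro k hk
      have hkF : k < F.length := by omega
      rw [List.getD_eq_getElem F [] hkF]
      exact ihr _ (List.getElem_mem hkF)
    refine ⟨by simp [setColA, ihl], ?_, ?_⟩
    · intro r hr
      unfold setColA at hr
      rw [List.mem_iff_getElem] at hr
      obtain ⟨idx, hidx, hre⟩ := hr
      rw [← hre, List.getElem_mapIdx, List.length_set]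
      apply ihr
      exact List.getElem_mem _
    · intro i a hi
      have hiF : i < F.length := by omega
      have hG : (setColA F nc (g nc (getColA F nc m))).getD i []
          = (F.getD i []).set nc ((g nc (getColA F nc m)).getD i 0) := by
        unfold setColA
        rw [List.getD_eq_getElem _ [] (by rw [List.length_mapIdx]; exact hiF),
          List.getElem_mapIdx, List.getD_eq_getElem F [] hiF]
      rw [hG, getD_set, hcol]
      by_cases ha : nc = a
      · subst ha
        rw [if_pos ⟨rfl, by rw [hFrow i hi]; omega⟩, if_pos (by omega)]
      · rw [if_neg (fun hc => ha hc.1), ihg i a hi]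
        rcases Nat.lt_trichotomy a nc with hlt | hlt | hlt
        · rw [if_pos hlt, if_pos (by omega)]
        · exact absurd hlt.symm ha
        · rw [if_neg (by omega), if_neg (by omega)]

theorem seePeople_eq (heights : List (List Int)) : seePeople heights = seePeople_alt heights := by
  simp only [seePeople, seePeople_alt]
  set m := heights.length with hm
  set n := (heights.headD []).length with hn
  -- pass 1 characterisation
  obtain ⟨h1len, h1get⟩ := pass1_spec
    (fun i row => rowLoopA (fun k => (heights.getD i []).getD k 0) n row) m
    ((List.range m).map (fun _ => List.replicate n (0 : Int))) (by simp)
  set A1 := (List.range m).foldl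
    (fun ans i => ans.set i (rowLoopA (fun k => (heights.getD i []).getD k 0) n (ans.getD i [])))
    ((List.range m).map (fun _ => List.replicate n (0 : Int))) with hA1def
  have hA1len : A1.length = m := by simpa using h1len
  have hA1row : ∀ i, i < m → (A1.getD i []).length = n := by
    intro i hi
    rw [h1get i, if_pos hi, getD_map_range, if_pos hi]
    exact rowLoopA_len' _ _ _ (by simp)
  have hA1val : ∀ i a, i < m →
      (A1.getD i []).getD a 0 = C (fun k => (heights.getD i []).getD k 0) a n := by
    intro i a hi
    rw [h1get i, if_pos hi, getD_map_range, if_pos hi,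
      rowLoopA_getD' _ _ _ (by simp), getD_replicate_zero, zero_add]
  have hA1mem : ∀ r ∈ A1, r.length = n := by
    intro r hr
    rw [List.mem_iff_getElem] at hr
    obtain ⟨i, hi, hre⟩ := hr
    rw [← hre, ← List.getD_eq_getElem A1 [] hi]
    exact hA1row i (by omega)
  obtain ⟨h2len, h2row, h2get⟩ := pass2_spec
    (fun j col => rowLoopA (fun k => (heights.getD k []).getD j 0) m col) m n
    n A1 hA1len hA1mem le_rfl
  apply List.ext_getElem
  · rw [h2len]; simp
  · intro i h1 h2
    have him : i < m := by rw [h2len] at h1; exact h1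
    apply List.ext_getElem
    · have hl1 := h2row _ (List.getElem_mem h1)
      rw [hl1]
      simp
    · intro a ha1 ha2
      have han : a < n := by
        have hl1 := h2row _ (List.getElem_mem h1)
        omega
      have hL : ((List.range n).foldl
          (fun ans j => setColA ans j (rowLoopA (fun k => (heights.getD k []).getD j 0) m (getColA ans j m))) A1)[i][a]
          = C (fun k => (heights.getD i []).getD k 0) a n
            + C (fun k => (heights.getD k []).getD a 0) i m := by
        rw [← List.getD_eq_getElem _ 0 ha1, ← List.getD_eq_getElem _ [] h1]
        rw [h2get i a him, if_pos han]
        rw [rowLoopA_getD' _ _ _ (by simp [getColA])]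
        unfold getColA
        rw [getD_map_range, if_pos him, hA1val i a him]
      rw [hL]
      simp only [List.getElem_map, List.getElem_range]
      rw [getD_map_range, if_pos him, getD_map_range, if_pos han,
        getD_map_range, if_pos han, getD_map_range, if_pos him]
      rw [scanB_eq_C (fun k => (heights.getD i []).getD k 0) a n,
        scanB_eq_C (fun k => (heights.getD k []).getD a 0) i m]

-- ===== VERDICT (by name: the statement is the Claim_ definition above) =====
theorem seePeople_spec : Claim_equal_seePeople := by
  intro heights _ _
  exact seePeople_eq heights
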